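-- pv_equiv track=rewrite | github.com/R1mvl/VesselsFeaturesExtraction | src/topology.py | getGraphFromSkeleton
-- ===== SOURCE A (Python) =====
-- def getGraphFromSkeleton(skeleton_point):
--     """
--         This function takes a list of coordinates of the skeleton points and returns a graph of the skeleton.
--
--         Args:
--             skeleton_point (list): list of coordinates of the skeleton points
--
--         Returns:
--             graph (list): graph of the skeleton
--     """
--     graph = []
--     for i in range(len(skeleton_point)):
--         graph.append([skeleton_point[i], []])
--
--     for i in range(len(skeleton_point)):
--         for j in range(len(skeleton_point)):
--             if i != j:
--                 if skeleton_point[i][0] - 1 <= skeleton_point[j][0] <= skeleton_point[i][0] + 1 and skeleton_point[i][1] - 1 <= skeleton_point[j][1] <= skeleton_point[i][1] + 1 and skeleton_point[i][2] - 1 <= skeleton_point[j][2] <= skeleton_point[i][2] + 1: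
--                     if j not in graph[i][1]:
--                         graph[i][1].append(j)
--                     if i not in graph[j][1]:
--                         graph[j][1].append(i)
--
--     return graph
-- ===== SOURCE B (Python) =====
-- _OFFSETS = [(dx, dy, dz) for dx in (-1, 0, 1) for dy in (-1, 0, 1) for dz in (-1, 0, 1)]
--
--
-- def getGraphFromSkeleton(skeleton_point):
--     """Hash each point's (x, y, z) cell once, then probe the 27 neighbouring
--     cells per point instead of scanning all other points."""
--     cells = {}
--     for idx, p in enumerate(skeleton_point):
--         cells.setdefault((p[0], p[1], p[2]), []).append(idx)
--     graph = []
--     for i, p in enumerate(skeleton_point):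
--         nbrs = []
--         for d in _OFFSETS:
--             nbrs += cells.get((p[0] + d[0], p[1] + d[1], p[2] + d[2]), [])
--         graph.append([p, sorted(j for j in nbrs if j != i)])
--     return graph
-- ===== Notes on version B (the rewrite author's own statement) =====
-- stated objective: faster
-- what changed: Replaces A's all-pairs double loop with symmetric dedup-insertion by a coordinate hash map built in one pass and 27 neighbor-cell probes per point, sorting each neighbor list (A's lists come out sorted by construction).
-- outside the precondition, e.g. on getGraphFromSkeleton([[]]): A returns [[[], []]], B raises IndexError
import Mathlib
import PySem

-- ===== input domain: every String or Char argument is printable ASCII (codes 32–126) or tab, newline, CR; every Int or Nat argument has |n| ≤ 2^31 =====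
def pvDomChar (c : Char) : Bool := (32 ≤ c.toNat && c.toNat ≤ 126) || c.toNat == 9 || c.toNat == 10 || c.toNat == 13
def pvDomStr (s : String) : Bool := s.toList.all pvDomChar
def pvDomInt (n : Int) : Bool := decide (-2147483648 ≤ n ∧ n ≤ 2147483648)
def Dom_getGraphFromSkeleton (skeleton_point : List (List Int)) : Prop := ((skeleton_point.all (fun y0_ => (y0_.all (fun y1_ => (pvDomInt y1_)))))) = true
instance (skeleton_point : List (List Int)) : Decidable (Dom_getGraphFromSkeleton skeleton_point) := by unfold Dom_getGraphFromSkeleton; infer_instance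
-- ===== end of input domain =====

-- B replaces A's O(n^2) all-pairs scan by a coordinate hash map probed at the 27 neighbouring
-- cells of each point (objective: faster, asymptotic).

-- ===== PORT A =====
-- the chained 26-neighbourhood comparison A performs; coordinate reads sp[i][0..2] are exact
-- under Pre_ (points of length ≥ 3), which excludes Python's IndexError
def pvAdj (p q : List Int) : Bool :=
  decide (p.getD 0 0 - 1 ≤ q.getD 0 0 ∧ q.getD 0 0 ≤ p.getD 0 0 + 1) &&
  decide (p.getD 1 0 - 1 ≤ q.getD 1 0 ∧ q.getD 1 0 ≤ p.getD 1 0 + 1) &&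
  decide (p.getD 2 0 - 1 ≤ q.getD 2 0 ∧ q.getD 2 0 ≤ p.getD 2 0 + 1)

-- body of A's inner loop for outer index i, inner index j (graph[i][1].append(j) is List.modify)
def pvRowA (sp : List (List Int)) (i : Nat) (g : List (List Int × List Int)) (j : Nat) :
    List (List Int × List Int) :=
  if i ≠ j then
    if pvAdj (sp.getD i []) (sp.getD j []) then
      let g1 := if (g.getD i ([], [])).2.contains ((j : Int)) then g
                else g.modify i (fun e => (e.1, e.2 ++ [(j : Int)]))
      if (g1.getD j ([], [])).2.contains ((i : Int)) then g1
      else g1.modify j (fun e => (e.1, e.2 ++ [(i : Int)]))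
    else g
  else g

def getGraphFromSkeleton (skeleton_point : List (List Int)) : List (List (List Int)) :=
  let n := skeleton_point.length
  let graph : List (List Int × List Int) := skeleton_point.map (fun p => (p, ([] : List Int)))
  let graph := (List.range n).foldl (fun g i => (List.range n).foldl (pvRowA skeleton_point i) g) graph
  graph.map (fun e => [e.1, e.2])

-- ===== PORT B =====
-- the comprehension _OFFSETS of Source B
def pvOffsets : List (Int × Int × Int) :=
  ([-1, 0, 1] : List Int).flatMap (fun dx =>
    ([-1, 0, 1] : List Int).flatMap (fun dy =>
      ([-1, 0, 1] : List Int).map (fun dz => (dx, dy, dz))))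

-- (p[0], p[1], p[2]); exact under Pre_ (points of length ≥ 3)
def pvKey (p : List Int) : Int × Int × Int := (p.getD 0 0, p.getD 1 0, p.getD 2 0)

-- cells[(p[0],p[1],p[2])].setdefault(...).append(idx) over enumerate(skeleton_point)
def pvCells (sp : List (List Int)) : PySem.Dict (Int × Int × Int) (List Int) :=
  (PySem.List.enumerate sp).foldl (fun d e => d.modify (pvKey e.2) [] (· ++ [e.1])) PySem.Dict.empty

def getGraphFromSkeleton_alt (skeleton_point : List (List Int)) : List (List (List Int)) :=
  let cells := pvCells skeleton_point
  (PySem.List.enumerate skeleton_point).map (fun e =>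
    let nbrs := pvOffsets.foldl (fun acc d =>
      acc ++ cells.getD (e.2.getD 0 0 + d.1, e.2.getD 1 0 + d.2.1, e.2.getD 2 0 + d.2.2) []) []
    [e.2, PySem.List.sorted (nbrs.filter (fun j => j ≠ e.1)) (fun x => x)])

-- ===== PRECONDITION & SPEC =====
-- Pre_ excludes inputs containing a point with fewer than 3 coordinates: with two or more points
-- Python A raises IndexError there, and on a singleton short point (where A still returns) B's
-- hashing pass raises IndexError, so the corner is excluded rather than matched.
def Pre_getGraphFromSkeleton (skeleton_point : List (List Int)) : Prop :=
  ∀ p ∈ skeleton_point, 3 ≤ p.length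
instance (skeleton_point : List (List Int)) : Decidable (Pre_getGraphFromSkeleton skeleton_point) := by
  unfold Pre_getGraphFromSkeleton; infer_instance

def pvWitness_getGraphFromSkeleton : List (List Int) := [[0, 0, 0], [1, 1, 0], [5, 5, 5]]

def Spec_getGraphFromSkeleton (skeleton_point : List (List Int)) (out : List (List (List Int))) : Prop :=
  out = getGraphFromSkeleton_alt skeleton_point
instance (skeleton_point : List (List Int)) (out : List (List (List Int))) :
    Decidable (Spec_getGraphFromSkeleton skeleton_point out) := by
  unfold Spec_getGraphFromSkeleton; infer_instance

-- ===== CLAIM (what is proved, stated in full; the proofs are below) =====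
def Claim_equal_getGraphFromSkeleton : Prop := ∀ (skeleton_point : List (List Int)), Dom_getGraphFromSkeleton skeleton_point → Pre_getGraphFromSkeleton skeleton_point → Spec_getGraphFromSkeleton skeleton_point (getGraphFromSkeleton skeleton_point)

-- ===== LEMMAS AND PROOFS =====

-- notation for the proofs: P i = skeleton_point[i], F i t = the sorted neighbour indices of i below t
def pvP (sp : List (List Int)) (i : Nat) : List Int := sp.getD i []

def pvF (sp : List (List Int)) (i t : Nat) : List Int :=
  ((List.range t).filter (fun j => j ≠ i && pvAdj (pvP sp i) (pvP sp j))).map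
    (fun (j : Nat) => (j : Int))

-- the bound describing how much of row i's final neighbour list is present after the outer loop
-- has fully processed rows < k and row k's inner loop has processed indices < m
def pvBnd (n k m i : Nat) : Nat :=
  if i < k then n else if i = k then max m k else if i < m then k + 1 else k

def pvGS (sp : List (List Int)) (k m : Nat) : List (List Int × List Int) :=
  (List.range sp.length).map (fun i => (pvP sp i, pvF sp i (pvBnd sp.length k m i)))

lemma pvAdj_comm (p q : List Int) : pvAdj p q = pvAdj q p := by
  rw [Bool.eq_iff_iff]; simp only [pvAdj]; simp; omega

lemma pvF_succ_pos (sp : List (List Int)) {i t : Nat} (h : t ≠ i)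
    (ha : pvAdj (pvP sp i) (pvP sp t) = true) :
    pvF sp i (t + 1) = pvF sp i t ++ [(t : Int)] := by
  simp [pvF, List.range_succ, List.filter_append, h, ha]

lemma pvF_succ_neg (sp : List (List Int)) {i t : Nat}
    (h : t = i ∨ pvAdj (pvP sp i) (pvP sp t) = false) :
    pvF sp i (t + 1) = pvF sp i t := by
  rcases h with h | h <;> simp [pvF, List.range_succ, List.filter_append, h]

lemma pvF_mem (sp : List (List Int)) (i t j : Nat) :
    ((j : Int) ∈ pvF sp i t) ↔ (j < t ∧ j ≠ i ∧ pvAdj (pvP sp i) (pvP sp j) = true) := by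
  simp [pvF]

lemma pvGS_getD (sp : List (List Int)) (k m i : Nat) (h : i < sp.length) :
    (pvGS sp k m).getD i ([], []) = (pvP sp i, pvF sp i (pvBnd sp.length k m i)) := by
  simpa [pvGS] using PySem.List.getD_map_range
    (fun i => (pvP sp i, pvF sp i (pvBnd sp.length k m i))) sp.length i (([], [])) h

lemma modify_map_range {β : Type} (n i : Nat) (g : Nat → β) (f : β → β) :
    ((List.range n).map g).modify i f =
      (List.range n).map (fun x => if x = i then f (g x) else g x) := by
  apply List.ext_getElem
  · simp
  · intro j h1 h2
    simp only [List.getElem_modify, List.getElem_map, List.getElem_range]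
    simp only [List.length_modify, List.length_map, List.length_range] at h1
    by_cases hij : i = j
    · simp [hij]
    · simp [hij, Ne.symm hij]

lemma pvGS_eq_of_bnd (sp : List (List Int)) (k m k' m' : Nat)
    (h : ∀ i < sp.length, pvF sp i (pvBnd sp.length k m i) = pvF sp i (pvBnd sp.length k' m' i)) :
    pvGS sp k m = pvGS sp k' m' := by
  unfold pvGS
  apply List.map_congr_left
  intro i hi
  simp only [List.mem_range] at hi
  rw [h i hi]

-- the inner step at j = m changes nothing when m = k or the points are not adjacent
lemma pvNoChange (sp : List (List Int)) (k m : Nat) (_hk : k < sp.length)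
    (h : m = k ∨ pvAdj (pvP sp k) (pvP sp m) = false) :
    pvGS sp k m = pvGS sp k (m + 1) := by
  apply pvGS_eq_of_bnd
  intro i hi
  rcases lt_trichotomy i k with hik | hik | hik
  · have e1 : pvBnd sp.length k m i = sp.length := by unfold pvBnd; split_ifs <;> omega
    have e2 : pvBnd sp.length k (m + 1) i = sp.length := by unfold pvBnd; split_ifs <;> omega
    rw [e1, e2]
  · have e1 : pvBnd sp.length k m i = max m k := by unfold pvBnd; split_ifs <;> omega
    have e2 : pvBnd sp.length k (m + 1) i = max (m + 1) k := by unfold pvBnd; split_ifs <;> omega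
    rw [e1, e2]
    rcases Nat.lt_or_ge m k with hmk | hmk
    · rw [Nat.max_eq_right (by omega), Nat.max_eq_right (by omega)]
    · rw [Nat.max_eq_left (by omega), Nat.max_eq_left (by omega)]
      refine (pvF_succ_neg sp ?_).symm
      rcases h with h | h
      · left; omega
      · right; rw [hik]; exact h
  · by_cases him : i = m
    · have e1 : pvBnd sp.length k m i = k := by unfold pvBnd; split_ifs <;> omega
      have e2 : pvBnd sp.length k (m + 1) i = k + 1 := by unfold pvBnd; split_ifs <;> omega
      rw [e1, e2]
      refine (pvF_succ_neg sp (Or.inr ?_)).symm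
      rcases h with h | h
      · exfalso; omega
      · rw [him, pvAdj_comm]; exact h
    · have e : pvBnd sp.length k m i = pvBnd sp.length k (m + 1) i := by
        unfold pvBnd; split_ifs <;> omega
      rw [e]

-- the inner step at j = m, m > k, adjacent: both appends fire
lemma pvChangeState (sp : List (List Int)) (k m : Nat) (_hk : k < sp.length) (_hm : m < sp.length)
    (hkm : k < m) (ha : pvAdj (pvP sp k) (pvP sp m) = true) :
    ((pvGS sp k m).modify k (fun e => (e.1, e.2 ++ [(m : Int)]))).modify m
        (fun e => (e.1, e.2 ++ [(k : Int)])) = pvGS sp k (m + 1) := by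
  unfold pvGS
  rw [modify_map_range, modify_map_range]
  apply List.map_congr_left
  intro i hi
  simp only [List.mem_range] at hi
  by_cases him : i = m
  · have hik : ¬ (i = k) := by omega
    rw [if_pos him, if_neg hik]
    have e1 : pvBnd sp.length k m i = k := by unfold pvBnd; split_ifs <;> omega
    have e2 : pvBnd sp.length k (m + 1) i = k + 1 := by unfold pvBnd; split_ifs <;> omega
    rw [e1, e2, pvF_succ_pos sp (show (k : Nat) ≠ i by omega)
      (by rw [him, pvAdj_comm]; exact ha)]
  · rw [if_neg him]
    by_cases hik : i = k
    · rw [if_pos hik]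
      have e1 : pvBnd sp.length k m i = m := by unfold pvBnd; split_ifs <;> omega
      have e2 : pvBnd sp.length k (m + 1) i = m + 1 := by unfold pvBnd; split_ifs <;> omega
      rw [e1, e2, pvF_succ_pos sp (show (m : Nat) ≠ i by omega) (by rw [hik]; exact ha)]
    · rw [if_neg hik]
      have e : pvBnd sp.length k m i = pvBnd sp.length k (m + 1) i := by
        unfold pvBnd; split_ifs <;> omega
      rw [e]

-- one step of row k's inner loop advances the invariant state
lemma pvStep (sp : List (List Int)) (k m : Nat) (hk : k < sp.length) (hm : m < sp.length) :
    pvRowA sp k (pvGS sp k m) m = pvGS sp k (m + 1) := by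
  unfold pvRowA
  by_cases hkm : k = m
  · rw [if_neg (by simpa using hkm)]
    exact pvNoChange sp k m hk (Or.inl hkm.symm)
  · rw [if_pos (by simpa using hkm)]
    by_cases ha : pvAdj (sp.getD k []) (sp.getD m []) = true
    · rw [if_pos ha]
      have ha' : pvAdj (pvP sp k) (pvP sp m) = true := ha
      rcases Nat.lt_or_ge k m with hlt | hge
      · -- m > k: both membership tests are false, both appends fire
        have hc1 : ((pvGS sp k m).getD k ([], [])).2.contains ((m : Int)) = false := by
          rw [pvGS_getD sp k m k hk]
          rw [Bool.eq_false_iff, ne_eq, List.contains_iff_mem, pvF_mem]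
          have e : pvBnd sp.length k m k = m := by unfold pvBnd; split_ifs <;> omega
          rw [e]; omega
        rw [hc1]
        simp only [Bool.false_eq_true, if_false]
        have hgm : (((pvGS sp k m).modify k
            (fun e => (e.1, e.2 ++ [(m : Int)]))).getD m ([], [])).2.contains ((k : Int)) = false := by
          unfold pvGS
          rw [modify_map_range]
          rw [PySem.List.getD_map_range _ _ _ _ hm, if_neg (by omega)]
          rw [Bool.eq_false_iff, ne_eq, List.contains_iff_mem, pvF_mem]
          have e : pvBnd sp.length k m m = k := by unfold pvBnd; split_ifs <;> omega
          rw [e]; omega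
        rw [hgm]
        simp only [Bool.false_eq_true, if_false]
        exact pvChangeState sp k m hk hm hlt ha'
      · -- m < k: both indices are already recorded, nothing happens
        have hmk : m < k := by omega
        have hc1 : ((pvGS sp k m).getD k ([], [])).2.contains ((m : Int)) = true := by
          rw [pvGS_getD sp k m k hk, List.contains_iff_mem, pvF_mem]
          have e : pvBnd sp.length k m k = k := by unfold pvBnd; split_ifs <;> omega
          rw [e]
          exact ⟨hmk, by omega, ha'⟩
        rw [if_pos hc1]
        have hc2 : ((pvGS sp k m).getD m ([], [])).2.contains ((k : Int)) = true := by
          rw [pvGS_getD sp k m m hm, List.contains_iff_mem, pvF_mem]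
          have e : pvBnd sp.length k m m = sp.length := by unfold pvBnd; split_ifs <;> omega
          rw [e]
          exact ⟨hk, by omega, by rw [pvAdj_comm]; exact ha'⟩
        rw [if_pos hc2]
        apply pvGS_eq_of_bnd
        intro i hi
        have e : pvBnd sp.length k m i = pvBnd sp.length k (m + 1) i := by
          unfold pvBnd; split_ifs <;> omega
        rw [e]
    · rw [if_neg ha]
      exact pvNoChange sp k m hk (Or.inr (by simpa using ha))

lemma pvInner (sp : List (List Int)) (k : Nat) (hk : k < sp.length) :
    ∀ m ≤ sp.length, (List.range m).foldl (pvRowA sp k) (pvGS sp k 0) = pvGS sp k m := by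
  intro m hm
  induction m with
  | zero => rfl
  | succ m ih =>
      rw [List.range_succ, List.foldl_append, ih (by omega), List.foldl_cons, List.foldl_nil,
        pvStep sp k m hk (by omega)]

lemma pvRowDone (sp : List (List Int)) (k : Nat) (_hk : k < sp.length) :
    pvGS sp k sp.length = pvGS sp (k + 1) 0 := by
  unfold pvGS
  apply List.map_congr_left
  intro i hi
  simp only [List.mem_range] at hi
  have hb : pvBnd sp.length k sp.length i = pvBnd sp.length (k + 1) 0 i := by
    unfold pvBnd; split_ifs <;> omega
  rw [hb]

lemma pvOuter (sp : List (List Int)) :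
    ∀ k ≤ sp.length,
      (List.range k).foldl (fun g i => (List.range sp.length).foldl (pvRowA sp i) g)
        (pvGS sp 0 0) = pvGS sp k 0 := by
  intro k hk
  induction k with
  | zero => rfl
  | succ k ih =>
      rw [List.range_succ, List.foldl_append, ih (by omega), List.foldl_cons, List.foldl_nil,
        pvInner sp k (by omega) sp.length le_rfl, pvRowDone sp k (by omega)]

lemma pvInit (sp : List (List Int)) :
    sp.map (fun p => (p, ([] : List Int))) = pvGS sp 0 0 := by
  apply List.ext_getElem
  · simp [pvGS]
  · intro i h1 h2
    simp only [List.length_map] at h1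
    have hb : pvBnd sp.length 0 0 i = 0 := by unfold pvBnd; split_ifs <;> omega
    simp [pvGS, pvP, pvF, hb, List.getElem?_eq_getElem h1]

-- A computes row i = [P i, F i n] for every i
lemma pvA_eq (sp : List (List Int)) :
    getGraphFromSkeleton sp =
      (List.range sp.length).map (fun i => [pvP sp i, pvF sp i sp.length]) := by
  unfold getGraphFromSkeleton
  simp only []
  rw [pvInit sp, pvOuter sp sp.length le_rfl]
  unfold pvGS
  rw [List.map_map]
  apply List.map_congr_left
  intro i hi
  simp only [List.mem_range] at hi
  have hb : pvBnd sp.length sp.length 0 i = sp.length := by unfold pvBnd; split_ifs <;> omega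
  simp [hb]

-- ===== B-side =====

def pvProbes (p : List Int) : List (Int × Int × Int) :=
  pvOffsets.map (fun d => (p.getD 0 0 + d.1, p.getD 1 0 + d.2.1, p.getD 2 0 + d.2.2))

lemma pvCells_getD (sp : List (List Int)) (c : Int × Int × Int) :
    (pvCells sp).getD c [] =
      ((PySem.List.enumerate sp).filter (fun e => pvKey e.2 == c)).map (fun e => e.1) := by
  have hfold : (PySem.List.enumerate sp).foldl
      (fun d e => d.modify (pvKey e.2) [] (· ++ [e.1])) PySem.Dict.empty =
      ((PySem.List.enumerate sp).map (fun e => (pvKey e.2, e.1))).foldl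
        (fun d p => d.modify p.1 [] (· ++ [p.2])) PySem.Dict.empty := by
    rw [List.foldl_map]
  unfold pvCells
  rw [hfold, PySem.Dict.getD_foldl_modify_append]
  simp [List.filter_map, Function.comp_def]

lemma pvAdj_iff_mem_probes (p q : List Int) :
    pvAdj p q = true ↔ pvKey q ∈ pvProbes p := by
  simp only [pvAdj, pvKey, pvProbes, pvOffsets, List.mem_map, List.mem_flatMap, List.mem_cons,
    Bool.and_eq_true, decide_eq_true_eq, Prod.mk.injEq, List.not_mem_nil, or_false]
  constructor
  · rintro ⟨⟨h1, h2⟩, h3⟩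
    exact ⟨(q.getD 0 0 - p.getD 0 0, q.getD 1 0 - p.getD 1 0, q.getD 2 0 - p.getD 2 0),
      ⟨q.getD 0 0 - p.getD 0 0, by omega, q.getD 1 0 - p.getD 1 0, by omega,
       q.getD 2 0 - p.getD 2 0, by omega, rfl⟩, by dsimp only; omega, by dsimp only; omega,
      by dsimp only; omega⟩
  · rintro ⟨d, ⟨dx, hdx, dy, hdy, dz, hdz, rfl⟩, h1, h2, h3⟩
    dsimp only at h1 h2 h3
    refine ⟨⟨?_, ?_⟩, ?_⟩ <;> omega

lemma pvProbes_nodup (p : List Int) : (pvProbes p).Nodup := by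
  apply List.Nodup.map
  · intro a b hab
    simp only [Prod.mk.injEq] at hab
    obtain ⟨h1, h2, h3⟩ := hab
    exact Prod.ext (by omega) (Prod.ext (by omega) (by omega))
  · decide

-- flatMap over distinct keys of per-key filters is a permutation of the one filter
lemma pvFlatMap_perm {α κ : Type} [BEq κ] [LawfulBEq κ] [DecidableEq κ] (keys : List κ)
    (hk : keys.Nodup)
    (l : List α) (f : α → κ) :
    (keys.flatMap (fun c => l.filter (fun a => f a == c))).Perm
      (l.filter (fun a => decide (f a ∈ keys))) := by
  induction keys with
  | nil => simp
  | cons c ks ih =>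
      simp only [List.nodup_cons] at hk
      have ihp := ih hk.2
      rw [List.flatMap_cons]
      refine List.Perm.trans ((ihp.append_left _)) ?_
      clear ihp ih
      induction l with
      | nil => simp
      | cons x t iht =>
          by_cases hxc : f x = c
          · simpa [hxc, hk.1] using iht.cons x
          · by_cases hxk : f x ∈ ks
            · simp only [List.filter_cons, beq_iff_eq, decide_eq_true_eq,
                if_neg hxc, if_pos hxk, if_pos (show f x ∈ c :: ks by simp [hxk])]
              exact List.perm_middle.trans (iht.cons x)
            · simpa [hxc, hxk] using iht
  
lemma pvEnum_eq (sp : List (List Int)) :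
    PySem.List.enumerate sp =
      (List.range sp.length).map (fun (i : Nat) => ((i : Int), pvP sp i)) := by
  apply List.ext_getElem
  · simp [PySem.List.length_enumerate]
  · intro j h1 h2
    simp only [PySem.List.length_enumerate] at h1
    rw [PySem.List.getElem_enumerate]
    simp [pvP, List.getElem?_eq_getElem h1]

lemma pvF_pairwise (sp : List (List Int)) (i t : Nat) :
    (pvF sp i t).Pairwise (fun a b => a < b) := by
  apply List.Pairwise.map
  · intro a b h
    exact_mod_cast h
  · exact (List.pairwise_lt_range.sublist List.filter_sublist).imp (fun h => h)

-- row i of B sorts exactly F i n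
set_option maxHeartbeats 1000000 in
lemma pvB_row (sp : List (List Int)) (i : Nat) (_hi : i < sp.length) :
    PySem.List.sorted
      ((pvOffsets.foldl (fun acc d =>
        acc ++ (pvCells sp).getD ((pvP sp i).getD 0 0 + d.1, (pvP sp i).getD 1 0 + d.2.1,
          (pvP sp i).getD 2 0 + d.2.2) []) []).filter (fun j => j ≠ (i : Int)))
      (fun x => x) = pvF sp i sp.length := by
  apply PySem.List.sorted_eq_of_perm_of_pairwise_lt _ _ _ ?_ ?_
  · -- pvF sp i n is a permutation of the filtered probe results
    have h1 : pvOffsets.foldl (fun acc d =>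
        acc ++ (pvCells sp).getD ((pvP sp i).getD 0 0 + d.1, (pvP sp i).getD 1 0 + d.2.1,
          (pvP sp i).getD 2 0 + d.2.2) []) [] =
        ((pvProbes (pvP sp i)).flatMap (fun c =>
          (PySem.List.enumerate sp).filter (fun e => pvKey e.2 == c))).map (fun e => e.1) := by
      rw [PySem.List.foldl_append_eq_flatMap, List.nil_append, pvProbes, List.flatMap_map,
        List.map_flatMap]
      congr 1
      funext d
      rw [pvCells_getD]
    rw [h1, List.filter_map]
    have hperm := (pvFlatMap_perm (pvProbes (pvP sp i)) (pvProbes_nodup _)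
      (PySem.List.enumerate sp) (fun e => pvKey e.2)).filter
      ((fun j => decide (j ≠ (i : Int))) ∘ (fun e : Int × List Int => e.1))
    refine List.Perm.symm (List.Perm.trans (hperm.map (fun e => e.1)) ?_)
    apply List.Perm.of_eq
    rw [pvEnum_eq, List.filter_map, List.filter_map, List.map_map, List.filter_filter]
    unfold pvF
    simp only [Function.comp_def]
    refine congrArg₂ List.map (funext fun j => rfl) ?_
    apply List.filter_congr
    intro j hj
    simp only [List.mem_range] at hj
    rw [Bool.eq_iff_iff]
    simp only [Bool.and_eq_true, decide_eq_true_eq, ne_eq, Int.natCast_inj,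
      ← pvAdj_iff_mem_probes]
  · exact (pvF_pairwise sp i sp.length).imp (fun h => h)

lemma pvB_eq (sp : List (List Int)) :
    getGraphFromSkeleton_alt sp =
      (List.range sp.length).map (fun i => [pvP sp i, pvF sp i sp.length]) := by
  unfold getGraphFromSkeleton_alt
  simp only []
  rw [pvEnum_eq, List.map_map]
  apply List.map_congr_left
  intro i hi
  simp only [List.mem_range] at hi
  simp only [Function.comp_def]
  rw [pvB_row sp i hi]

-- ===== VERDICT (by name: the statement is the Claim_ definition above) =====
theorem getGraphFromSkeleton_spec : Claim_equal_getGraphFromSkeleton := by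
  intro sp _ _
  unfold Spec_getGraphFromSkeleton
  rw [pvA_eq, pvB_eq]
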